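-- pv_equiv track=rewrite | github.com/Czarne-Jagodki/labs | lab4/kosaraju.py | group_result
-- ===== SOURCE A (Python) =====
-- def group_result(input):
--    """
--    Functions groups the results of kosaraju function to clusters which are represented by dictonary and list
--    :param input:  result from kosaraju function
--    :return: dictionaty with key - number of cluster , value - array of vertexes which fit to cluster
--    """
--    results = dict(sorted(input.items(), key=lambda item: item[1]))
--    list_of_results = {}
--
--    for key, value  in results.items():
--        if value not in list_of_results:
--           temp = []
--           temp.append(key)
--           list_of_results[value] = temp
--        else:
--            list_of_results[value].append(key)
--
--    return list_of_results
-- ===== SOURCE B (Python) =====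
-- def group_result(input):
--     groups = {}
--     for key, value in input.items():
--         groups.setdefault(value, []).append(key)
--     return {v: groups[v] for v in sorted(groups)}
-- ===== Notes on version B (the rewrite author's own statement) =====
-- stated objective: faster
-- what changed: B groups keys by value in one pass over the input in original order via setdefault/append and only sorts the distinct cluster labels at the end, instead of A's sort-all-items-then-group-with-if/else; the sort shrinks from all n items to the k distinct values.
import Mathlib
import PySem

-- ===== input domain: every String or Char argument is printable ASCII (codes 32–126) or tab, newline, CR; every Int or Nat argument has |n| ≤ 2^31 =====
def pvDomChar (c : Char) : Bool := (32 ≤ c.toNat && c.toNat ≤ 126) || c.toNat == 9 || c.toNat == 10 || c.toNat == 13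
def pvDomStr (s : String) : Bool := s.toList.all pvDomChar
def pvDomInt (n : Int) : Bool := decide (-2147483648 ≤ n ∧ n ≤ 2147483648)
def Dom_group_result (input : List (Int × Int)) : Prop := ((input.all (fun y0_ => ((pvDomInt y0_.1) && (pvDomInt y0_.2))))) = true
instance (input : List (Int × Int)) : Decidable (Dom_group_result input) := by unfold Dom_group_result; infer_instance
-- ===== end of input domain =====

-- B groups keys by value in one pass over the original order (setdefault/append) and sorts only the cluster
-- labels at the end, instead of A's sort-all-items-first-then-group; same result, and the sort shrinks to the distinct values (measured faster).

-- ===== PORT A =====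
def group_result (input : List (Int × Int)) : List (Int × List Int) :=
  -- results = dict(sorted(input.items(), key=lambda item: item[1]))
  let results : PySem.Dict Int Int :=
    PySem.Dict.ofList (PySem.List.sorted (PySem.Dict.ofList input).items (fun item => item.2) false)
  -- list_of_results = {}; for key, value in results.items(): …
  let list_of_results : PySem.Dict Int (List Int) :=
    results.items.foldl (fun d p =>
      if d.contains p.2 = false then
        d.insert p.2 ([] ++ [p.1])          -- temp = []; temp.append(key); d[value] = temp
      else
        d.modify p.2 [] (fun l => l ++ [p.1]))  -- d[value].append(key)
      PySem.Dict.empty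
  list_of_results.items

-- ===== PORT B =====
def group_result_alt (input : List (Int × Int)) : List (Int × List Int) :=
  -- groups = {}; for key, value in input.items(): groups.setdefault(value, []).append(key)
  let groups : PySem.Dict Int (List Int) :=
    (PySem.Dict.ofList input).items.foldl
      (fun d p => d.modify p.2 [] (fun l => l ++ [p.1])) PySem.Dict.empty
  -- {v: groups[v] for v in sorted(groups)}
  (PySem.List.sorted groups.keys (fun v => v) false).map (fun v => (v, groups.getD v []))

-- ===== PRECONDITION & SPEC =====
def Spec_group_result (input : List (Int × Int)) (out : List (Int × List Int)) : Prop := out = group_result_alt input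
instance (input : List (Int × Int)) (out : List (Int × List Int)) : Decidable (Spec_group_result input out) := by unfold Spec_group_result; infer_instance

-- ===== CLAIM (what is proved, stated in full; the proofs are below) =====
def Claim_equal_group_result : Prop := ∀ (input : List (Int × Int)), Dom_group_result input → Spec_group_result input (group_result input)

-- ===== LEMMAS AND PROOFS =====

-- items of an association list with distinct keys, seen as a dict, is the list itself
theorem pv_items_ofList_of_nodup {ν : Type} (l : List (Int × ν)) (h : (l.map Prod.fst).Nodup) :
    (PySem.Dict.ofList l).items = l := by
  show (PySem.Dict.empty.update l).items = l
  unfold PySem.Dict.update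
  have := PySem.Dict.items_foldl_insert_fresh l Prod.fst Prod.snd PySem.Dict.empty
    (by intro a _; simp [PySem.Dict.contains_empty]) h
  simpa using this

-- A's if/else grouping step IS a modify step
theorem pv_stepA_eq_modify (d : PySem.Dict Int (List Int)) (p : Int × Int) :
    (if d.contains p.2 = false then d.insert p.2 ([] ++ [p.1])
     else d.modify p.2 [] (fun l => l ++ [p.1])) = d.modify p.2 [] (fun l => l ++ [p.1]) := by
  by_cases h : d.contains p.2 = false
  · simp only [h, if_true]
    show d.insert p.2 ([] ++ [p.1]) = d.insert p.2 ((d.getD p.2 []) ++ [p.1])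
    rw [PySem.Dict.getD_of_not_contains d _ h]
  · simp [h]

-- lookup in the grouping fold: keys grouped by the pair's second component
theorem pv_getD_group (l : List (Int × Int)) (v : Int) :
    (l.foldl (fun d p => d.modify p.2 [] (fun g => g ++ [p.1])) PySem.Dict.empty).getD v []
      = (l.filter (fun p => p.2 == v)).map Prod.fst := by
  have hm : l.foldl (fun d p => d.modify p.2 [] (fun g => g ++ [p.1])) PySem.Dict.empty
      = (l.map (fun p => (p.2, p.1))).foldl (fun d q => d.modify q.1 [] (fun g => g ++ [q.2])) PySem.Dict.empty := by
    rw [List.foldl_map]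
  rw [hm, PySem.Dict.getD_foldl_modify_append]
  simp [List.filter_map, Function.comp_def, List.map_map, PySem.Dict.getD_empty]

-- keys of the grouping fold: the distinct values, in first-occurrence order
theorem pv_keys_group (l : List (Int × Int)) :
    (l.foldl (fun d p => d.modify p.2 [] (fun g => g ++ [p.1])) PySem.Dict.empty).keys
      = PySem.Set.ofList (l.map Prod.snd) := by
  have := PySem.Dict.keys_foldl_modify_key l (fun p => p.2) [] (fun _ p g => g ++ [p.1]) PySem.Dict.empty
  simpa [PySem.Dict.keys_empty, PySem.Set.update_empty] using this

theorem pv_nodup_keys_group (l : List (Int × Int)) :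
    (l.foldl (fun d p => d.modify p.2 [] (fun g => g ++ [p.1])) PySem.Dict.empty).keys.Nodup := by
  rw [pv_keys_group]; exact PySem.Set.nodup_ofList _

-- set(xs) is a sublist of xs
theorem pv_ofList_sublist {α : Type} [BEq α] [LawfulBEq α] (xs : List α) :
    (PySem.Set.ofList xs).Sublist xs := by
  induction xs with
  | nil => simp [PySem.Set.ofList_nil]
  | cons x t ih =>
    rw [PySem.Set.ofList_cons]
    refine List.Sublist.cons₂ x ?_
    exact List.Sublist.trans (by simp [PySem.Set.discard]) ih

-- stability of Python's sort: one insertBy step, on a sorted accumulator, appends x at the end of its key class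
theorem pv_insertBy_filter {α : Type} (key : α → Int) (v : Int) (x : α) (ys : List α)
    (hs : List.Pairwise (fun a b => key a ≤ key b) ys) :
    (PySem.List.insertBy (fun a b => decide (key a < key b)) x ys).filter (fun z => key z == v)
      = if key x == v then ys.filter (fun z => key z == v) ++ [x] else ys.filter (fun z => key z == v) := by
  induction ys with
  | nil => by_cases h : key x = v <;> simp [PySem.List.insertBy, h]
  | cons y t ih =>
    rw [List.pairwise_cons] at hs
    by_cases hb : key x < key y
    · have hx : (PySem.List.insertBy (fun a b => decide (key a < key b)) x (y :: t))
          = x :: y :: t := by simp [PySem.List.insertBy, hb]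
      rw [hx]
      by_cases hv : key x = v
      · have hnone : (y :: t).filter (fun z => key z == v) = [] := by
          rw [List.filter_eq_nil_iff]
          intro z hz
          have : key y ≤ key z := by
            rcases List.mem_cons.1 hz with rfl | hz
            · simp
            · exact hs.1 z hz
          have : v < key z := by omega
          simp; omega
        simp [hv, hnone]
      · have hxv : (key x == v) = false := by simp [hv]
        simp [List.filter_cons, hxv]
    · have hx : (PySem.List.insertBy (fun a b => decide (key a < key b)) x (y :: t))
          = y :: PySem.List.insertBy (fun a b => decide (key a < key b)) x t := by
        simp [PySem.List.insertBy, hb]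
      rw [hx, List.filter_cons, List.filter_cons, ih hs.2]
      by_cases hv : key x = v <;> by_cases hy : key y = v <;> simp [hv, hy]

-- insertBy keeps the accumulator sorted
theorem pv_insertBy_pairwise {α : Type} (key : α → Int) (x : α) (ys : List α)
    (hs : List.Pairwise (fun a b => key a ≤ key b) ys) :
    List.Pairwise (fun a b => key a ≤ key b)
      (PySem.List.insertBy (fun a b => decide (key a < key b)) x ys) := by
  induction ys with
  | nil => simp [PySem.List.insertBy]
  | cons y t ih =>
    rw [List.pairwise_cons] at hs
    by_cases hb : key x < key y
    · have hx : (PySem.List.insertBy (fun a b => decide (key a < key b)) x (y :: t))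
          = x :: y :: t := by simp [PySem.List.insertBy, hb]
      rw [hx]
      refine List.pairwise_cons.2 ⟨?_, List.pairwise_cons.2 hs⟩
      intro z hz
      rcases List.mem_cons.1 hz with rfl | hz
      · omega
      · have := hs.1 z hz; omega
    · have hx : (PySem.List.insertBy (fun a b => decide (key a < key b)) x (y :: t))
          = y :: PySem.List.insertBy (fun a b => decide (key a < key b)) x t := by
        simp [PySem.List.insertBy, hb]
      rw [hx]
      refine List.pairwise_cons.2 ⟨?_, ih hs.2⟩
      intro z hz
      have hmem := (PySem.List.mem_insertBy _ _ _ _).1 hz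
      rcases hmem with rfl | hz'
      · omega
      · exact hs.1 z hz'

theorem pv_foldl_insertBy_filter {α : Type} (key : α → Int) (v : Int) (l : List α) (acc : List α)
    (hs : List.Pairwise (fun a b => key a ≤ key b) acc) :
    (l.foldl (fun acc x => PySem.List.insertBy (fun a b => decide (key a < key b)) x acc) acc).filter (fun z => key z == v)
      = acc.filter (fun z => key z == v) ++ l.filter (fun z => key z == v) := by
  induction l generalizing acc with
  | nil => simp
  | cons x t ih =>
    rw [List.foldl_cons, ih _ (pv_insertBy_pairwise key x acc hs),
      pv_insertBy_filter key v x acc hs, List.filter_cons]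
    by_cases hv : key x = v <;> simp [hv]

-- STABILITY: Python's stable sort preserves the original order within each key class
theorem pv_sorted_filter {α : Type} (key : α → Int) (v : Int) (l : List α) :
    (PySem.List.sorted l key false).filter (fun z => key z == v) = l.filter (fun z => key z == v) := by
  rw [PySem.List.sorted_eq_foldl_insertBy, pv_foldl_insertBy_filter key v l [] (by simp)]
  simp

-- the distinct values of the sorted items = the sorted distinct values
theorem pv_values_sorted (xs : List (Int × Int)) :
    PySem.Set.ofList ((PySem.List.sorted xs (fun p => p.2) false).map Prod.snd)
      = PySem.List.sorted (PySem.Set.ofList (xs.map Prod.snd)) (fun v => v) false := by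
  apply PySem.List.eq_of_perm_of_pairwise_le_of_injective (key := fun v => v) (fun a b h => h)
  · -- same members + both Nodup
    rw [List.perm_ext_iff_of_nodup (PySem.Set.nodup_ofList _)
      ((PySem.List.sorted_perm _ _ _).nodup_iff.2 (PySem.Set.nodup_ofList _))]
    intro a
    rw [PySem.Set.mem_ofList, (PySem.List.sorted_perm (PySem.Set.ofList (xs.map Prod.snd)) (fun v => v) false).mem_iff,
      PySem.Set.mem_ofList]
    exact List.Perm.mem_iff ((PySem.List.sorted_perm xs (fun p => p.2) false).map Prod.snd)
  · -- sublist of a sorted list is sorted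
    exact List.Pairwise.sublist (pv_ofList_sublist _)
      (by simpa [List.pairwise_map] using PySem.List.sorted_pairwise xs (fun p => p.2))
  · exact PySem.List.sorted_pairwise _ _

-- ===== VERDICT (by name: the statement is the Claim_ definition above) =====
theorem group_result_spec : Claim_equal_group_result := by
  intro input _
  unfold Spec_group_result group_result group_result_alt
  dsimp only
  set xs := (PySem.Dict.ofList input).items with hxs
  have hnod : (xs.map Prod.fst).Nodup := by
    simpa [PySem.Dict.keys] using PySem.Dict.nodup_keys_ofList input
  set ys := PySem.List.sorted xs (fun item => item.2) false with hys
  have hynod : (ys.map Prod.fst).Nodup :=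
    (((PySem.List.sorted_perm xs (fun item => item.2) false).map Prod.fst).nodup_iff).2 hnod
  -- dict(sorted(...)) is the sorted list itself
  rw [pv_items_ofList_of_nodup ys hynod]
  -- A's loop is the modify loop
  have hfold : ys.foldl (fun d p =>
      if d.contains p.2 = false then d.insert p.2 ([] ++ [p.1])
      else d.modify p.2 [] (fun l => l ++ [p.1])) PySem.Dict.empty
      = ys.foldl (fun d p => d.modify p.2 [] (fun l => l ++ [p.1])) PySem.Dict.empty := by
    apply PySem.List.foldl_congr_mem
    intro d p _
    exact pv_stepA_eq_modify d p
  rw [hfold]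
  -- both sides as a map over their key lists
  rw [PySem.Dict.items_eq_map_keys _ (pv_nodup_keys_group ys) []]
  rw [pv_keys_group ys, pv_keys_group xs]
  have hkeys : PySem.Set.ofList (ys.map Prod.snd)
      = PySem.List.sorted (PySem.Set.ofList (xs.map Prod.snd)) (fun v => v) false :=
    pv_values_sorted xs
  rw [hkeys]
  apply List.map_congr_left
  intro v _
  rw [pv_getD_group ys v, pv_getD_group xs v, hys]
  rw [pv_sorted_filter (fun p => p.2) v xs]
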